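-- pv_equiv track=rewrite | github.com/Galarzaa90/tibiawiki-sql | tibiawikisql/tasks/images.py | generate_outfit_image_names
-- ===== SOURCE A (Python) =====
-- OUTFIT_NAME_TEMPLATES = [
--     "Outfit %s Male.gif",
--     "Outfit %s Male Addon 1.gif",
--     "Outfit %s Male Addon 2.gif",
--     "Outfit %s Male Addon 3.gif",
--     "Outfit %s Female.gif",
--     "Outfit %s Female Addon 1.gif",
--     "Outfit %s Female Addon 2.gif",
--     "Outfit %s Female Addon 3.gif",
-- ]
--
-- OUTFIT_ADDON_SEQUENCE = (0, 1, 2, 3) * 2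
--
-- OUTFIT_SEX_SEQUENCE = ["Male"] * 4 + ["Female"] * 4
--
-- def generate_outfit_image_names(rows: list[tuple[int, str]]) -> tuple[list[str], dict[str, tuple[int, int, str]]]:
--     """Generate outfit image file names and tuple metadata."""
--     titles = []
--     image_info: dict[str, tuple[int, int, str]] = {}
--     for article_id, name in rows:
--         for i, template in enumerate(OUTFIT_NAME_TEMPLATES):
--             file_name = template % name
--             image_info[file_name] = (article_id, OUTFIT_ADDON_SEQUENCE[i], OUTFIT_SEX_SEQUENCE[i])
--             titles.append(file_name)
--     return titles, image_info
-- ===== SOURCE B (Python) =====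
-- def generate_outfit_image_names(rows):
--     """Generate outfit image file names and tuple metadata."""
--     titles = []
--     image_info = {}
--     for article_id, name in rows:
--         for sex in ("Male", "Female"):
--             for k in range(4):
--                 if k == 0:
--                     file_name = f"Outfit {name} {sex}.gif"
--                 else:
--                     file_name = f"Outfit {name} {sex} Addon {k}.gif"
--                 image_info[file_name] = (article_id, k, sex)
--                 titles.append(file_name)
--     return titles, image_info
-- ===== Notes on version B (the rewrite author's own statement) =====
-- stated objective: simpler
-- what changed: Drops the three parallel module-level tables (templates, addon sequence, sex sequence) and instead generates the 8 combinations structurally with nested loops over sex and addon index, building each filename directly.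
import Mathlib
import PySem

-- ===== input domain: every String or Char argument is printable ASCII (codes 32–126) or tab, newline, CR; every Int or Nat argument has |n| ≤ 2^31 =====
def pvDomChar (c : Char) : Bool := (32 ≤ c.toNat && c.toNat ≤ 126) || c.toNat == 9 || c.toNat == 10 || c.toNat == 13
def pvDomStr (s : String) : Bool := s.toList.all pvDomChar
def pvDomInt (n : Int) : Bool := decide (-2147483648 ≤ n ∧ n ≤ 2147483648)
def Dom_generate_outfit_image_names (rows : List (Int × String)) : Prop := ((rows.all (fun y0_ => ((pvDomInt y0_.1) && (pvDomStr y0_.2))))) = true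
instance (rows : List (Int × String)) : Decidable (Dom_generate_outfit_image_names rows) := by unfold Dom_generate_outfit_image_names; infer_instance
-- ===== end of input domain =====

-- B replaces A's three parallel module-level tables (templates / addon sequence / sex sequence)
-- by structural nested loops over sex and addon index, building the filename directly; objective: simpler.

-- ===== PORT A =====
def OUTFIT_NAME_TEMPLATES : List String :=
  ["Outfit %s Male.gif", "Outfit %s Male Addon 1.gif", "Outfit %s Male Addon 2.gif",
   "Outfit %s Male Addon 3.gif", "Outfit %s Female.gif", "Outfit %s Female Addon 1.gif",
   "Outfit %s Female Addon 2.gif", "Outfit %s Female Addon 3.gif"]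

def OUTFIT_ADDON_SEQUENCE : List Int := [0, 1, 2, 3, 0, 1, 2, 3]

def OUTFIT_SEX_SEQUENCE : List String :=
  ["Male", "Male", "Male", "Male", "Female", "Female", "Female", "Female"]

-- inner loop body of A: one row, iterate over enumerate(OUTFIT_NAME_TEMPLATES);
-- 'template % name' is ported as replacing the single "%s" in the template (exact: each
-- template contains exactly one "%s" and name is a str)
def pvStepA (st : List String × PySem.Dict String (Int × Int × String)) (row : Int × String) :
    List String × PySem.Dict String (Int × Int × String) :=
  (PySem.List.enumerate OUTFIT_NAME_TEMPLATES).foldl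
    (fun st2 it =>
      let file_name := PySem.Str.replace it.2 "%s" row.2
      (st2.1 ++ [file_name],
       st2.2.insert file_name
         (row.1, PySem.List.pyGetD OUTFIT_ADDON_SEQUENCE it.1 0,
          PySem.List.pyGetD OUTFIT_SEX_SEQUENCE it.1 ""))) st

def generate_outfit_image_names (rows : List (Int × String)) :
    List String × (List (String × Int × Int × String)) :=
  let r := rows.foldl pvStepA ([], PySem.Dict.empty)
  (r.1, r.2.items)

-- ===== PORT B =====
-- inner loop body of B: one row, loops over sex then addon index k in range(4)
def pvStepB (st : List String × PySem.Dict String (Int × Int × String)) (row : Int × String) :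
    List String × PySem.Dict String (Int × Int × String) :=
  (["Male", "Female"]).foldl
    (fun st1 sex =>
      (PySem.List.pyRange 0 4 1).foldl
        (fun st2 k =>
          let file_name :=
            if k == 0 then "Outfit " ++ row.2 ++ " " ++ sex ++ ".gif"
            else "Outfit " ++ row.2 ++ " " ++ sex ++ " Addon " ++ PySem.Int.toStr k ++ ".gif"
          (st2.1 ++ [file_name], st2.2.insert file_name (row.1, k, sex))) st1) st

def generate_outfit_image_names_alt (rows : List (Int × String)) :
    List String × (List (String × Int × Int × String)) :=
  let r := rows.foldl pvStepB ([], PySem.Dict.empty)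
  (r.1, r.2.items)

-- ===== PRECONDITION & SPEC =====
def Spec_generate_outfit_image_names (rows : List (Int × String)) (out : List String × (List (String × Int × Int × String))) : Prop := out = generate_outfit_image_names_alt rows
instance (rows : List (Int × String)) (out : List String × (List (String × Int × Int × String))) : Decidable (Spec_generate_outfit_image_names rows out) := by unfold Spec_generate_outfit_image_names; infer_instance

-- ===== CLAIM (what is proved, stated in full; the proofs are below) =====
def Claim_equal_generate_outfit_image_names : Prop := ∀ (rows : List (Int × String)), Dom_generate_outfit_image_names rows → Spec_generate_outfit_image_names rows (generate_outfit_image_names rows)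

-- ===== LEMMAS AND PROOFS =====
theorem pvStep_eq : pvStepA = pvStepB := by
  funext st row
  have h0 : PySem.Str.replace "Outfit %s Male.gif" "%s" row.2 = "Outfit " ++ row.2 ++ " " ++ "Male" ++ ".gif" := by
    apply String.toList_injective; simp [PySem.Str.replace, PySem.Chars.replace, PySem.Chars.replace.go]
  have h1 : PySem.Str.replace "Outfit %s Male Addon 1.gif" "%s" row.2 = "Outfit " ++ row.2 ++ " " ++ "Male" ++ " Addon " ++ PySem.Int.toStr 1 ++ ".gif" := by
    apply String.toList_injective; simp [PySem.Str.replace, PySem.Chars.replace, PySem.Chars.replace.go, PySem.Int.toStr,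
      show PySem.Int.toChars 1 = ['1'] from by decide]
  have h2 : PySem.Str.replace "Outfit %s Male Addon 2.gif" "%s" row.2 = "Outfit " ++ row.2 ++ " " ++ "Male" ++ " Addon " ++ PySem.Int.toStr 2 ++ ".gif" := by
    apply String.toList_injective; simp [PySem.Str.replace, PySem.Chars.replace, PySem.Chars.replace.go, PySem.Int.toStr,
      show PySem.Int.toChars 2 = ['2'] from by decide]
  have h3 : PySem.Str.replace "Outfit %s Male Addon 3.gif" "%s" row.2 = "Outfit " ++ row.2 ++ " " ++ "Male" ++ " Addon " ++ PySem.Int.toStr 3 ++ ".gif" := by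
    apply String.toList_injective; simp [PySem.Str.replace, PySem.Chars.replace, PySem.Chars.replace.go, PySem.Int.toStr,
      show PySem.Int.toChars 3 = ['3'] from by decide]
  have h4 : PySem.Str.replace "Outfit %s Female.gif" "%s" row.2 = "Outfit " ++ row.2 ++ " " ++ "Female" ++ ".gif" := by
    apply String.toList_injective; simp [PySem.Str.replace, PySem.Chars.replace, PySem.Chars.replace.go]
  have h5 : PySem.Str.replace "Outfit %s Female Addon 1.gif" "%s" row.2 = "Outfit " ++ row.2 ++ " " ++ "Female" ++ " Addon " ++ PySem.Int.toStr 1 ++ ".gif" := by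
    apply String.toList_injective; simp [PySem.Str.replace, PySem.Chars.replace, PySem.Chars.replace.go, PySem.Int.toStr,
      show PySem.Int.toChars 1 = ['1'] from by decide]
  have h6 : PySem.Str.replace "Outfit %s Female Addon 2.gif" "%s" row.2 = "Outfit " ++ row.2 ++ " " ++ "Female" ++ " Addon " ++ PySem.Int.toStr 2 ++ ".gif" := by
    apply String.toList_injective; simp [PySem.Str.replace, PySem.Chars.replace, PySem.Chars.replace.go, PySem.Int.toStr,
      show PySem.Int.toChars 2 = ['2'] from by decide]
  have h7 : PySem.Str.replace "Outfit %s Female Addon 3.gif" "%s" row.2 = "Outfit " ++ row.2 ++ " " ++ "Female" ++ " Addon " ++ PySem.Int.toStr 3 ++ ".gif" := by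
    apply String.toList_injective; simp [PySem.Str.replace, PySem.Chars.replace, PySem.Chars.replace.go, PySem.Int.toStr,
      show PySem.Int.toChars 3 = ['3'] from by decide]
  simp only [pvStepA, pvStepB,
    show PySem.List.enumerate OUTFIT_NAME_TEMPLATES =
      [(0, "Outfit %s Male.gif"), (1, "Outfit %s Male Addon 1.gif"), (2, "Outfit %s Male Addon 2.gif"),
       (3, "Outfit %s Male Addon 3.gif"), (4, "Outfit %s Female.gif"), (5, "Outfit %s Female Addon 1.gif"),
       (6, "Outfit %s Female Addon 2.gif"), (7, "Outfit %s Female Addon 3.gif")] from by decide,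
    show PySem.List.pyRange 0 4 1 = [0, 1, 2, 3] from by decide,
    List.foldl_cons, List.foldl_nil]
  simp only [h0, h1, h2, h3, h4, h5, h6, h7,
    show PySem.List.pyGetD OUTFIT_ADDON_SEQUENCE (0:Int) 0 = 0 from by decide,
    show PySem.List.pyGetD OUTFIT_ADDON_SEQUENCE (1:Int) 0 = 1 from by decide,
    show PySem.List.pyGetD OUTFIT_ADDON_SEQUENCE (2:Int) 0 = 2 from by decide,
    show PySem.List.pyGetD OUTFIT_ADDON_SEQUENCE (3:Int) 0 = 3 from by decide,
    show PySem.List.pyGetD OUTFIT_ADDON_SEQUENCE (4:Int) 0 = 0 from by decide,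
    show PySem.List.pyGetD OUTFIT_ADDON_SEQUENCE (5:Int) 0 = 1 from by decide,
    show PySem.List.pyGetD OUTFIT_ADDON_SEQUENCE (6:Int) 0 = 2 from by decide,
    show PySem.List.pyGetD OUTFIT_ADDON_SEQUENCE (7:Int) 0 = 3 from by decide,
    show PySem.List.pyGetD OUTFIT_SEX_SEQUENCE (0:Int) "" = "Male" from by decide,
    show PySem.List.pyGetD OUTFIT_SEX_SEQUENCE (1:Int) "" = "Male" from by decide,
    show PySem.List.pyGetD OUTFIT_SEX_SEQUENCE (2:Int) "" = "Male" from by decide,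
    show PySem.List.pyGetD OUTFIT_SEX_SEQUENCE (3:Int) "" = "Male" from by decide,
    show PySem.List.pyGetD OUTFIT_SEX_SEQUENCE (4:Int) "" = "Female" from by decide,
    show PySem.List.pyGetD OUTFIT_SEX_SEQUENCE (5:Int) "" = "Female" from by decide,
    show PySem.List.pyGetD OUTFIT_SEX_SEQUENCE (6:Int) "" = "Female" from by decide,
    show PySem.List.pyGetD OUTFIT_SEX_SEQUENCE (7:Int) "" = "Female" from by decide]
  norm_num

-- ===== VERDICT (by name: the statement is the Claim_ definition above) =====
theorem generate_outfit_image_names_spec : Claim_equal_generate_outfit_image_names := by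
  intro rows _
  unfold Spec_generate_outfit_image_names generate_outfit_image_names generate_outfit_image_names_alt
  rw [pvStep_eq]
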